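-- pv_equiv track=rewrite | github.com/georgebvro/freeCodeCamp-Daily-Coding-Challenge | 2026-04/2026-04-07/palindrome_characters.py | palindrome_locator
-- ===== SOURCE A (Python) =====
-- def palindrome_locator(s):
--     length = len(s)
--
--     for i in range(length // 2):
--         if s[i] != s[length - 1 - i]:
--             return "none"
--
--     middle = ""
--
--     if (not length % 2):
--         middle += s[length // 2 - 1]
--
--     middle += s[length // 2]
--
--     return middle
-- ===== SOURCE B (Python) =====
-- def palindrome_locator(s):
--     if s != s[::-1]:
--         return "none"
--     n = len(s)
--     return s[(n - 1) // 2 : n // 2 + 1]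
-- ===== Notes on version B (the rewrite author's own statement) =====
-- stated objective: idiomatic
-- what changed: Replaces the index-pair two-pointer scan with a whole-string reversal comparison, and the conditional string concatenation for the middle with a single slice s[(n-1)//2 : n//2+1].
-- outside the precondition, e.g. on palindrome_locator(''): A raises IndexError, B returns ''
import Mathlib
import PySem

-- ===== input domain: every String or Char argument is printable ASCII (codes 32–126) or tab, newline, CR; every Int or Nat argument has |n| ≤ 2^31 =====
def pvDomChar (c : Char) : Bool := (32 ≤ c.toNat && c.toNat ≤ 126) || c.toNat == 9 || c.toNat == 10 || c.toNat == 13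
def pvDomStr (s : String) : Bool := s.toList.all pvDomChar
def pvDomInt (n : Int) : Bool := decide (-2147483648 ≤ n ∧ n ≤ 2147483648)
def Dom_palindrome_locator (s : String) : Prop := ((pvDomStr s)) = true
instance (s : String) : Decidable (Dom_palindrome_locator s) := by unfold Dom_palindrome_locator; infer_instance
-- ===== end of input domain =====

-- B replaces A's two-pointer scan by a reversal comparison and the conditional middle
-- concatenation by one slice (idiomatic, same O(n) cost); on "" A raises IndexError, B returns "".

-- ===== PORT A =====
-- Transliteration of A: for-loop over range(len//2) with early return "none" (rendered as
-- List.all, which short-circuits exactly like the loop), then the conditional middle append.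
-- All indices A reads are in range whenever A returns (s ≠ ""), so getD's default ' ' is never
-- the value A uses on Pre_; on "" the Python raises IndexError (excluded by Pre_).
def palindrome_locator (s : String) : String :=
  let cs := s.toList
  let n := cs.length
  if (List.range (n / 2)).all (fun i => cs.getD i ' ' == cs.getD (n - 1 - i) ' ') then
    -- middle = "" ; if not n % 2: middle += s[n//2 - 1] ; middle += s[n//2]  (inlined)
    String.ofList ((if n % 2 == 0 then [cs.getD (n / 2 - 1) ' '] else []) ++ [cs.getD (n / 2) ' '])
  else "none"

-- ===== PORT B =====
-- Transliteration of Source B: s != s[::-1] (reversal comparison, see PySem slice?_none_none_neg_one: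
-- s[::-1] is the reverse), then the slice s[(n-1)//2 : n//2 + 1].
def palindrome_locator_alt (s : String) : String :=
  let cs := s.toList
  if cs ≠ cs.reverse then "none"
  else
    -- n = len(s); s[(n - 1) // 2 : n // 2 + 1]
    String.ofList (PySem.List.slice cs (some (PySem.Int.floordiv ((cs.length : Int) - 1) 2))
                                   (some (PySem.Int.floordiv (cs.length : Int) 2 + 1)))

-- ===== PRECONDITION & SPEC =====
-- Pre_ excludes exactly the empty string, on which A raises IndexError (s[length//2 - 1] with
-- length = 0 reads s[-1] of an empty string).
def Pre_palindrome_locator (s : String) : Prop := s ≠ ""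
instance (s : String) : Decidable (Pre_palindrome_locator s) := by unfold Pre_palindrome_locator; infer_instance
def pvWitness_palindrome_locator : String := "aba"

def Spec_palindrome_locator (s : String) (out : String) : Prop := out = palindrome_locator_alt s
instance (s : String) (out : String) : Decidable (Spec_palindrome_locator s out) := by unfold Spec_palindrome_locator; infer_instance

-- ===== CLAIM (what is proved, stated in full; the proofs are below) =====
def Claim_equal_palindrome_locator : Prop := ∀ (s : String), Dom_palindrome_locator s → Pre_palindrome_locator s → Spec_palindrome_locator s (palindrome_locator s)

-- ===== LEMMAS AND PROOFS =====

-- A's two-pointer check is equivalent to the reversal comparison.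
theorem pal_check_iff (cs : List Char) :
    (∀ i < cs.length / 2, cs.getD i ' ' = cs.getD (cs.length - 1 - i) ' ') ↔ cs = cs.reverse := by
  constructor
  · intro h
    apply List.ext_getElem (by simp)
    intro i hi hi'
    have hlen : cs.reverse.length = cs.length := by simp
    rw [List.getElem_reverse]
    by_cases hc : i < cs.length / 2
    · have := h i hc
      rwa [List.getD_eq_getElem cs ' ' (by omega), List.getD_eq_getElem cs ' ' (by omega)] at this
    · by_cases he : cs.length - 1 - i = i
      · exact (getElem_congr_idx he).symm
      · have hj : cs.length - 1 - i < cs.length / 2 := by omega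
        have := (h _ hj).symm
        have hrw : cs.length - 1 - (cs.length - 1 - i) = i := by omega
        rw [hrw] at this
        rwa [List.getD_eq_getElem cs ' ' (by omega), List.getD_eq_getElem cs ' ' (by omega)] at this
  · intro h i hi
    have hi1 : i < cs.length := by omega
    have hi2 : cs.length - 1 - i < cs.length := by omega
    rw [List.getD_eq_getElem cs ' ' hi1, List.getD_eq_getElem cs ' ' hi2]
    have h2 : cs[i] = cs.reverse[i]'(by simpa using hi1) := List.getElem_of_eq h hi1
    simpa only [List.getElem_reverse] using h2

theorem drop_take_two (cs : List Char) (k : Nat) (h : k + 1 < cs.length) :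
    (cs.drop k).take 2 = [cs.getD k ' ', cs.getD (k + 1) ' '] := by
  rw [List.drop_eq_getElem_cons (by omega), List.drop_eq_getElem_cons (by omega : k + 1 < cs.length)]
  rw [List.getD_eq_getElem cs ' ' (by omega), List.getD_eq_getElem cs ' ' (by omega : k + 1 < cs.length)]
  rfl

theorem drop_take_one (cs : List Char) (k : Nat) (h : k < cs.length) :
    (cs.drop k).take 1 = [cs.getD k ' '] := by
  rw [List.drop_eq_getElem_cons h, List.getD_eq_getElem cs ' ' h]
  rfl

-- B's middle slice equals A's middle concatenation, for any nonempty list.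
theorem middle_slice_eq (cs : List Char) (hne : cs ≠ []) :
    PySem.List.slice cs (some (PySem.Int.floordiv ((cs.length : Int) - 1) 2))
                        (some (PySem.Int.floordiv (cs.length : Int) 2 + 1))
      = (if cs.length % 2 == 0 then [cs.getD (cs.length / 2 - 1) ' '] else [])
          ++ [cs.getD (cs.length / 2) ' '] := by
  have hn : 0 < cs.length := List.length_pos_of_ne_nil hne
  have h1 : PySem.Int.floordiv ((cs.length : Int) - 1) 2 = ((cs.length - 1) / 2 : Nat) := by
    have hcast : ((cs.length : Int) - 1) = ((cs.length - 1 : Nat) : Int) := by push_cast [hn]; ring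
    rw [hcast]
    exact_mod_cast PySem.Int.floordiv_natCast (cs.length - 1) 2
  have h2 : PySem.Int.floordiv (cs.length : Int) 2 + 1 = ((cs.length / 2 + 1 : Nat) : Int) := by
    push_cast [← PySem.Int.floordiv_natCast cs.length 2]
    norm_num
  rw [h1, h2, PySem.List.slice_natCast]
  rcases Nat.even_or_odd cs.length with he | ho
  · have hmod : cs.length % 2 = 0 := Nat.even_iff.mp he
    have hk : cs.length / 2 - 1 + 1 = cs.length / 2 := by omega
    have hcnt : cs.length / 2 + 1 - (cs.length - 1) / 2 = 2 := by omega
    have hst : (cs.length - 1) / 2 = cs.length / 2 - 1 := by omega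
    rw [hcnt, hst, drop_take_two cs _ (by omega), hk]
    simp [hmod]
  · have hmod : cs.length % 2 = 1 := Nat.odd_iff.mp ho
    have hst : (cs.length - 1) / 2 = cs.length / 2 := by omega
    have hcnt : cs.length / 2 + 1 - (cs.length - 1) / 2 = 1 := by omega
    rw [hcnt, hst, drop_take_one cs _ (by omega)]
    simp [hmod]

-- ===== VERDICT (by name: the statement is the Claim_ definition above) =====
theorem palindrome_locator_spec : Claim_equal_palindrome_locator := by
  intro s _ hpre
  unfold Spec_palindrome_locator palindrome_locator palindrome_locator_alt
  have hne : s.toList ≠ [] := by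
    intro h
    apply hpre
    rw [← String.ofList_toList (s := s), h]
  by_cases hpal : s.toList = s.toList.reverse
  · have hall : (List.range (s.toList.length / 2)).all
        (fun i => s.toList.getD i ' ' == s.toList.getD (s.toList.length - 1 - i) ' ') = true := by
      simp only [List.all_eq_true, List.mem_range, beq_iff_eq]
      exact fun i hi => (pal_check_iff s.toList).mpr hpal i hi
    rw [if_pos hall, if_neg (not_not_intro hpal)]
    rw [middle_slice_eq s.toList hne]
  · have hall : ¬ ((List.range (s.toList.length / 2)).all
        (fun i => s.toList.getD i ' ' == s.toList.getD (s.toList.length - 1 - i) ' ') = true) := by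
      simp only [List.all_eq_true, List.mem_range, beq_iff_eq]
      intro h
      exact hpal ((pal_check_iff s.toList).mp h)
    rw [if_neg hall, if_pos hpal]
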